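-- pv_equiv track=rewrite | github.com/laushkin1/STU_Study | prog2024/cvicenie4/sekcia3/uloha14.py | rovnaka_farba
-- ===== SOURCE A (Python) =====
-- def rovnaka_farba(x1: int, y1: int, x2: int, y2: int) -> bool:
--     if not all(i < 9 and i > 0 for i in [x1, x2, y1, y2]):
--         return False
--
--     chess_board = []
--     for i in range(8):
--         if i%2: chess_board.append([1, 0, 1, 0, 1, 0, 1, 0])
--         else: chess_board.append([0, 1, 0, 1, 0, 1, 0, 1])
--
--     indx_x1 = 8-x1
--     indx_x2 = 8-x2
--     indx_y1 = y1-1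
--     indx_y2 = y2-1
--     if chess_board[indx_y1][indx_x1] == chess_board[indx_y2][indx_x2]: return True
--     return False
-- ===== SOURCE B (Python) =====
-- def rovnaka_farba(x1: int, y1: int, x2: int, y2: int) -> bool:
--     if not all(i < 9 and i > 0 for i in [x1, x2, y1, y2]):
--         return False
--     return (x1 + y1) % 2 == (x2 + y2) % 2
-- ===== Notes on version B (the rewrite author's own statement) =====
-- stated objective: simpler
-- what changed: Replaces the 8x8 board table construction and double indexing with the closed-form parity test (x1+y1)%2 == (x2+y2)%2, keeping the same range guard.
import Mathlib
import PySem

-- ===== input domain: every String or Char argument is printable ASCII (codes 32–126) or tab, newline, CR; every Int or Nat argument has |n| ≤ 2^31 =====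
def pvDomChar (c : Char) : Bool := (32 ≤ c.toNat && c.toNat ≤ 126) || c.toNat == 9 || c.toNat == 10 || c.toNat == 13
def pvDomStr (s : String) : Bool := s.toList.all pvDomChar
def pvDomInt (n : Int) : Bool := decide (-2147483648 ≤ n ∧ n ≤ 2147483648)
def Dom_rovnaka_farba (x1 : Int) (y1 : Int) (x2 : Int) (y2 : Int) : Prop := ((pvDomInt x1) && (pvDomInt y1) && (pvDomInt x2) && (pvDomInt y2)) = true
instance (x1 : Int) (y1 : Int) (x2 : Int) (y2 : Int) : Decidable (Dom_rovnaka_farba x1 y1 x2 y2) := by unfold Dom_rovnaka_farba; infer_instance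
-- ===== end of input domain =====

-- ===== PORT A =====
-- Port of A: builds the 8x8 board row by row and compares the two indexed cells.
def rovnaka_farba (x1 : Int) (y1 : Int) (x2 : Int) (y2 : Int) : Bool :=
  if !([x1, x2, y1, y2].all (fun i => i < 9 && i > 0)) then false
  else
    let chess_board : List (List Int) :=
      (PySem.List.pyRange 0 8 1).foldl (fun acc i =>
        if i % 2 != 0 then acc ++ [[1, 0, 1, 0, 1, 0, 1, 0]]
        else acc ++ [[0, 1, 0, 1, 0, 1, 0, 1]]) []
    let indx_x1 := 8 - x1
    let indx_x2 := 8 - x2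
    let indx_y1 := y1 - 1
    let indx_y2 := y2 - 1
    match PySem.List.pyGet? chess_board indx_y1, PySem.List.pyGet? chess_board indx_y2 with
    | some row1, some row2 =>
      match PySem.List.pyGet? row1 indx_x1, PySem.List.pyGet? row2 indx_x2 with
      | some c1, some c2 => if c1 == c2 then true else false
      | _, _ => false  -- unreachable: guard ensures all indices in range
    | _, _ => false  -- unreachable

-- ===== PORT B =====
-- Port of B: same guard, then a closed-form parity comparison (no board table).
def rovnaka_farba_alt (x1 : Int) (y1 : Int) (x2 : Int) (y2 : Int) : Bool :=
  if !([x1, x2, y1, y2].all (fun i => i < 9 && i > 0)) then false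
  else PySem.Int.mod (x1 + y1) 2 == PySem.Int.mod (x2 + y2) 2

-- ===== PRECONDITION & SPEC =====
def Spec_rovnaka_farba (x1 : Int) (y1 : Int) (x2 : Int) (y2 : Int) (out : Bool) : Prop := out = rovnaka_farba_alt x1 y1 x2 y2
instance (x1 : Int) (y1 : Int) (x2 : Int) (y2 : Int) (out : Bool) : Decidable (Spec_rovnaka_farba x1 y1 x2 y2 out) := by unfold Spec_rovnaka_farba; infer_instance

-- ===== CLAIM (what is proved, stated in full; the proofs are below) =====
def Claim_equal_rovnaka_farba : Prop := ∀ (x1 : Int) (y1 : Int) (x2 : Int) (y2 : Int), Dom_rovnaka_farba x1 y1 x2 y2 → Spec_rovnaka_farba x1 y1 x2 y2 (rovnaka_farba x1 y1 x2 y2)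

-- ===== LEMMAS AND PROOFS =====

-- ===== VERDICT (by name: the statement is the Claim_ definition above) =====
theorem rovnaka_farba_spec : Claim_equal_rovnaka_farba := by
  intro x1 y1 x2 y2 _
  unfold Spec_rovnaka_farba rovnaka_farba rovnaka_farba_alt
  by_cases hg : ([x1, x2, y1, y2].all (fun i => i < 9 && i > 0)) = true
  · simp only [hg, Bool.not_true, Bool.false_eq_true, if_false]
    simp only [List.all_cons, List.all_nil, Bool.and_true, Bool.and_eq_true,
      decide_eq_true_eq] at hg
    obtain ⟨⟨h1a, h1b⟩, ⟨h2a, h2b⟩, ⟨h3a, h3b⟩, ⟨h4a, h4b⟩⟩ := hg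
    interval_cases x1 <;> interval_cases y1 <;> interval_cases x2 <;> interval_cases y2 <;> decide
  · simp [hg]
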